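-- pv_equiv track=rewrite | github.com/paulgclark/arsenal_tpms | rf_logger.py | bit_list_to_bit_str
-- ===== SOURCE A (Python) =====
-- def bit_list_to_bit_str(bit_list, separator=False):
--     bit_str = ""
--     for i, bit in enumerate(bit_list):
--         if separator:
--             if i % 8 == 0:
--                 bit_str += '|'
--             elif i % 4 == 0:
--                 bit_str += ' '
--         bit_str += str(bit)
--     return bit_str
-- ===== SOURCE B (Python) =====
-- def bit_list_to_bit_str(bit_list, separator=False):
--     if not separator:
--         return ''.join(str(bit) for bit in bit_list)
--     pieces = []
--     for g in range((len(bit_list) + 3) // 4):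
--         pieces.append('|' if g % 2 == 0 else ' ')
--         pieces.append(''.join(str(bit) for bit in bit_list[4 * g:4 * g + 4]))
--     return ''.join(pieces)
-- ===== Notes on version B (the rewrite author's own statement) =====
-- stated objective: alternative
-- what changed: Replaces A's per-index i%8/i%4 test inside a single string-concatenation loop by a group-structured traversal: the list is processed in chunks of 4 at group index g with a separator chosen by the parity of g, and the result is assembled with ''.join of the collected pieces.
import Mathlib
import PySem

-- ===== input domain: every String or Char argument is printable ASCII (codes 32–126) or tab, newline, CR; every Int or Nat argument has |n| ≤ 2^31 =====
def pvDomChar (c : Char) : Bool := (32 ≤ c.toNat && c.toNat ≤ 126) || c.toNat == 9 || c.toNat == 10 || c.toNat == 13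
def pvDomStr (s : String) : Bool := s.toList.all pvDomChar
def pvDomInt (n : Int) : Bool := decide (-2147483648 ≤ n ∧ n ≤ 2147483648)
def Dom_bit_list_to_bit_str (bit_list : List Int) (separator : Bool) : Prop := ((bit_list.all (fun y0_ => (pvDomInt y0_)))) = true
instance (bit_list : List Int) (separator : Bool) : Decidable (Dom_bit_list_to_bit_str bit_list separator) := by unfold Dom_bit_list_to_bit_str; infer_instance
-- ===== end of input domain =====

-- B replaces A's per-index i%8/i%4 test inside one append loop by a group-of-4 chunked
-- traversal with a parity-chosen separator per group (objective: alternative decomposition).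

-- ===== PORT A =====
def bit_list_to_bit_str (bit_list : List Int) (separator : Bool) : String :=
  (PySem.List.enumerate bit_list 0).foldl
    (fun bit_str p =>
      (if separator then
        if PySem.Int.mod p.1 8 == 0 then bit_str ++ "|"
        else if PySem.Int.mod p.1 4 == 0 then bit_str ++ " "
        else bit_str
      else bit_str) ++ PySem.Int.toStr p.2) ""

-- ===== PORT B =====
-- the for-loop of Source B over range((len+3)//4): each group g emits its parity separator
-- and the joined chunk bit_list[4*g : 4*g+4]
-- loop body: append the group separator and the joined chunk for group g
def pvStepB (bit_list : List Int) : List String → Int → List String :=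
  fun pieces g =>
    pieces ++ [(if PySem.Int.mod g 2 == 0 then "|" else " "),
      String.join ((PySem.List.slice bit_list (some (4 * g)) (some (4 * g + 4))).map PySem.Int.toStr)]

def bit_list_to_bit_str_alt (bit_list : List Int) (separator : Bool) : String :=
  if separator then
    String.join
      ((PySem.List.pyRange 0 (PySem.Int.floordiv ((bit_list.length : Int) + 3) 4) 1).foldl
        (pvStepB bit_list) [])
  else String.join (bit_list.map PySem.Int.toStr)

-- ===== PRECONDITION & SPEC =====
def Spec_bit_list_to_bit_str (bit_list : List Int) (separator : Bool) (out : String) : Prop := out = bit_list_to_bit_str_alt bit_list separator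
instance (bit_list : List Int) (separator : Bool) (out : String) : Decidable (Spec_bit_list_to_bit_str bit_list separator out) := by unfold Spec_bit_list_to_bit_str; infer_instance

-- ===== CLAIM (what is proved, stated in full; the proofs are below) =====
def Claim_equal_bit_list_to_bit_str : Prop := ∀ (bit_list : List Int) (separator : Bool), Dom_bit_list_to_bit_str bit_list separator → Spec_bit_list_to_bit_str bit_list separator (bit_list_to_bit_str bit_list separator)

-- ===== LEMMAS AND PROOFS =====

-- proof-internal chunk recursion: the list of pieces the group loop produces
def pvPieces : List Int → Nat → List String
  | [], _ => []
  | a :: t, g =>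
      (if g % 2 == 0 then "|" else " ")
        :: String.join (((a :: t).take 4).map PySem.Int.toStr)
        :: pvPieces ((a :: t).drop 4) (g + 1)
termination_by l _ => l.length
decreasing_by simp

theorem pv_join_nil : String.join ([] : List String) = "" := rfl

theorem pv_foldl_str (l : List String) (s t : String) :
    l.foldl (fun r x => r ++ x) (s ++ t) = s ++ l.foldl (fun r x => r ++ x) t := by
  induction l generalizing t with
  | nil => rfl
  | cons a l ih => simp only [List.foldl, String.append_assoc, ih]

theorem pv_join_cons (a : String) (l : List String) :
    String.join (a :: l) = a ++ String.join l := by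
  show l.foldl (fun r x => r ++ x) ("" ++ a) = a ++ String.join l
  rw [String.empty_append, ← String.append_empty (s := a), String.append_assoc,
    String.empty_append, pv_foldl_str]
  rfl

theorem pvPieces_nil (g : Nat) : pvPieces [] g = [] := by
  rw [pvPieces.eq_def]

theorem pvPieces_cons (a : Int) (t : List Int) (g : Nat) :
    pvPieces (a :: t) g =
      (if g % 2 == 0 then "|" else " ")
        :: String.join (((a :: t).take 4).map PySem.Int.toStr)
        :: pvPieces ((a :: t).drop 4) (g + 1) := by
  rw [pvPieces.eq_def]

-- A's step function with separator = true
def pvStepT : String → Int × Int → String := fun bit_str p =>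
  (if PySem.Int.mod p.1 8 == 0 then bit_str ++ "|"
   else if PySem.Int.mod p.1 4 == 0 then bit_str ++ " "
   else bit_str) ++ PySem.Int.toStr p.2

theorem pvStepT_first (s : String) (g : Nat) (x : Int) :
    pvStepT s (4 * (g : Int), x) = s ++ ((if g % 2 == 0 then "|" else " ") ++ PySem.Int.toStr x) := by
  by_cases hg : g % 2 = 0
  · have h8 : (8:Int) ∣ 4 * (g : Int) := by
      obtain ⟨k, hk⟩ : ∃ k, g = 2 * k := ⟨g / 2, by omega⟩
      exact ⟨(k : Int), by rw [hk]; push_cast; ring⟩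
    simp [pvStepT, PySem.Int.mod, Int.fmod_eq_emod, h8, hg, String.append_assoc]
  · have h8 : ¬ (8:Int) ∣ 4 * (g : Int) := by rintro ⟨m, hm⟩; omega
    have h4 : (4:Int) ∣ 4 * (g : Int) := ⟨(g : Int), rfl⟩
    simp [pvStepT, PySem.Int.mod, Int.fmod_eq_emod, h8, h4, hg, String.append_assoc]

theorem pvStepT_mid (s : String) (i : Int) (x : Int)
    (h8 : ¬ (8:Int) ∣ i) (h4 : ¬ (4:Int) ∣ i) :
    pvStepT s (i, x) = s ++ PySem.Int.toStr x := by
  simp [pvStepT, PySem.Int.mod, Int.fmod_eq_emod, h8, h4]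

theorem pv_sepTrue : ∀ (n : Nat) (l : List Int), l.length ≤ n → ∀ (g : Nat) (acc : String),
    (PySem.List.enumerate l (4 * (g : Int))).foldl pvStepT acc
      = acc ++ String.join (pvPieces l g) := by
  intro n
  induction n with
  | zero =>
      intro l hl g acc
      have : l = [] := List.eq_nil_of_length_eq_zero (Nat.le_zero.mp hl)
      subst this
      simp [PySem.List.enumerate_nil, pvPieces_nil, pv_join_nil]
  | succ n ih =>
      intro l hl g acc
      have hsep : ∀ (k : Nat), 1 ≤ k → k ≤ 3 → ∀ (s : String) (x : Int),
          pvStepT s (4 * (g : Int) + (k : Int), x) = s ++ PySem.Int.toStr x := by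
        intro k h1 h3 s x
        refine pvStepT_mid s _ x ?_ ?_
        · rintro ⟨m, hm⟩; omega
        · rintro ⟨m, hm⟩; omega
      match l with
      | [] => simp [PySem.List.enumerate_nil, pvPieces_nil, pv_join_nil]
      | [a] =>
          simp only [PySem.List.enumerate_cons, PySem.List.enumerate_nil, List.foldl,
            pvStepT_first, List.take, List.map, List.drop]
          simp [pvPieces_cons, pvPieces_nil, pv_join_cons, pv_join_nil, String.append_assoc]
      | [a, b] =>
          have e2 : (4 * (g : Int)) + 1 + 1 = 4 * (g : Int) + (2 : Nat) := by push_cast; ring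
          simp only [PySem.List.enumerate_cons, PySem.List.enumerate_nil, List.foldl,
            pvStepT_first]
          rw [show ((4 : Int) * (g : Int) + 1) = 4 * (g : Int) + ((1 : Nat) : Int) by push_cast; ring]
          rw [hsep 1 (by omega) (by omega)]
          simp [pvPieces_cons, pvPieces_nil, pv_join_cons, pv_join_nil, String.append_assoc]
      | [a, b, c] =>
          simp only [PySem.List.enumerate_cons, PySem.List.enumerate_nil, List.foldl,
            pvStepT_first]
          rw [show ((4 : Int) * (g : Int) + 1) = 4 * (g : Int) + ((1 : Nat) : Int) by push_cast; ring]
          rw [hsep 1 (by omega) (by omega)]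
          rw [show ((4 : Int) * (g : Int) + ((1 : Nat) : Int) + 1) = 4 * (g : Int) + ((2 : Nat) : Int) by push_cast; ring]
          rw [hsep 2 (by omega) (by omega)]
          simp [pvPieces_cons, pvPieces_nil, pv_join_cons, pv_join_nil, String.append_assoc]
      | a :: b :: c :: d :: t =>
          simp only [PySem.List.enumerate_cons, List.foldl, pvStepT_first]
          rw [show ((4 : Int) * (g : Int) + 1) = 4 * (g : Int) + ((1 : Nat) : Int) by push_cast; ring]
          rw [hsep 1 (by omega) (by omega)]
          rw [show ((4 : Int) * (g : Int) + ((1 : Nat) : Int) + 1) = 4 * (g : Int) + ((2 : Nat) : Int) by push_cast; ring]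
          rw [hsep 2 (by omega) (by omega)]
          rw [show ((4 : Int) * (g : Int) + ((2 : Nat) : Int) + 1) = 4 * (g : Int) + ((3 : Nat) : Int) by push_cast; ring]
          rw [hsep 3 (by omega) (by omega)]
          rw [show ((4 : Int) * (g : Int) + ((3 : Nat) : Int) + 1) = 4 * (((g + 1 : Nat)) : Int) by push_cast; ring]
          rw [ih t (by simp at hl ⊢; omega) (g + 1)]
          simp [pvPieces_cons, pvPieces_nil, pv_join_cons, pv_join_nil, String.append_assoc]

theorem pv_sepFalse : ∀ (l : List Int) (s : Int) (acc : String),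
    (PySem.List.enumerate l s).foldl (fun b p => b ++ PySem.Int.toStr p.2) acc
      = acc ++ String.join (l.map PySem.Int.toStr) := by
  intro l
  induction l with
  | nil => intro s acc; simp [PySem.List.enumerate_nil, pv_join_nil]
  | cons a t ih =>
      intro s acc
      simp only [PySem.List.enumerate_cons, List.foldl, List.map]
      rw [ih]
      simp [pv_join_cons, String.append_assoc]


-- B's fold over range((len+3)//4) with absolute slices produces exactly the pvPieces chunks
theorem pv_bridge : ∀ (k G g : Nat) (l : List Int) (acc : List String),
    G = (l.length + 3) / 4 → g + k = G →
    (PySem.List.pyRange (g : Int) (G : Int) 1).foldl (pvStepB l) acc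
      = acc ++ pvPieces (l.drop (4 * g)) g := by
  intro k
  induction k with
  | zero =>
      intro G g l acc hG hk
      have hg : g = G := by omega
      subst hg
      have hdrop : l.drop (4 * g) = [] := by
        apply List.drop_eq_nil_of_le; omega
      have hr : PySem.List.pyRange (g : Int) (g : Int) 1 = [] := by
        simp [PySem.List.pyRange]
      rw [hr, hdrop, pvPieces_nil]
      simp
  | succ k ih =>
      intro G g l acc hG hk
      have hlt : (g : Int) < (G : Int) := by exact_mod_cast (by omega : g < G)
      rw [PySem.List.pyRange_one_cons hlt]
      have hlen : 4 * g < l.length := by omega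
      obtain ⟨a, t, ht⟩ : ∃ a t, l.drop (4 * g) = a :: t := by
        rcases h : l.drop (4 * g) with _ | ⟨a, t⟩
        · have hlen0 := congrArg List.length h
          simp only [List.length_drop, List.length_nil] at hlen0
          omega
        · exact ⟨a, t, rfl⟩
      have hsl := PySem.List.slice_natCast_add l (4 * g) 4
      push_cast at hsl
      have hstep : pvStepB l acc (g : Int)
          = acc ++ [(if g % 2 == 0 then "|" else " "),
              String.join (((l.drop (4 * g)).take 4).map PySem.Int.toStr)] := by
        by_cases hg : g % 2 = 0
        · have hm : (2:Int) ∣ (g : Int) := by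
            obtain ⟨m, hmm⟩ : ∃ m, g = 2 * m := ⟨g / 2, by omega⟩
            exact ⟨(m : Int), by rw [hmm]; push_cast; ring⟩
          simp [pvStepB, hsl, PySem.Int.mod, Int.fmod_eq_emod, hm, hg]
        · have hm : ¬ (2:Int) ∣ (g : Int) := by rintro ⟨m, hmm⟩; omega
          simp [pvStepB, hsl, PySem.Int.mod, Int.fmod_eq_emod, hm, hg]
      simp only [List.foldl]
      rw [hstep]
      have hg1 : ((g : Int) + 1) = ((g + 1 : Nat) : Int) := by push_cast; ring
      rw [hg1, ih G (g + 1) l _ hG (by omega)]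
      rw [ht, pvPieces_cons, ← ht]
      have hd : (l.drop (4 * g)).drop 4 = l.drop (4 * (g + 1)) := by
        rw [List.drop_drop]; congr 1 <;> omega
      rw [hd]
      simp [List.append_assoc]

-- ===== VERDICT (by name: the statement is the Claim_ definition above) =====
theorem bit_list_to_bit_str_spec : Claim_equal_bit_list_to_bit_str := by
  intro l sep _
  unfold Spec_bit_list_to_bit_str bit_list_to_bit_str bit_list_to_bit_str_alt
  cases sep with
  | false =>
      simp only [Bool.false_eq_true, if_false]
      exact pv_sepFalse l 0 ""
  | true =>
      simp only [if_true]
      have hG : PySem.Int.floordiv ((l.length : Int) + 3) 4 = (((l.length + 3) / 4 : Nat) : Int) := by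
        rw [show ((l.length : Int) + 3) = (((l.length + 3 : Nat)) : Int) by push_cast; ring]
        exact_mod_cast PySem.Int.floordiv_natCast (l.length + 3) 4
      have hb := pv_bridge ((l.length + 3) / 4) ((l.length + 3) / 4) 0 l [] rfl (by omega)
      simp only [Nat.cast_zero, List.drop_zero, List.nil_append] at hb
      rw [hG, hb]
      have h := pv_sepTrue l.length l le_rfl 0 ""
      simp only [Nat.cast_zero, mul_zero] at h
      exact h
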